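-- pv_equiv track=rewrite | github.com/DannyAlmois/PhD_IoT_Zigbee_Cybersecurity | zigbee_dos_simulation20018_lat.py | filter_packets_during_jamming
-- ===== SOURCE A (Python) =====
-- def filter_packets_during_jamming(timestamps, values, sources, jamming_moments, dos_source="DoS-Attacker"):
--   # Filtrē paketes: ja pakete ir no DoS uzbrucēja un tās laiks atbilst bloķēšanas intervālam, tad tā tiek izslēgta no aprēķina.
--     filtered_timestamps = []
--     filtered_values = []
--     for t, val, src in zip(timestamps, values, sources):
--         in_jamming = False
--         for interval in jamming_moments:
--             start, end = interval
--             if start <= t <= end: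
--                 in_jamming = True
--                 break
--         if src == dos_source and in_jamming:
--             continue
--         filtered_timestamps.append(t)
--         filtered_values.append(val)
--     return filtered_timestamps, filtered_values
-- ===== SOURCE B (Python) =====
-- def _bisect_right(a, x):
--     # hand-written bisect.bisect_right (A imports nothing, so no bisect import)
--     lo, hi = 0, len(a)
--     while lo < hi:
--         mid = (lo + hi) // 2
--         if x < a[mid]:
--             hi = mid
--         else:
--             lo = mid + 1
--     return lo
--
--
-- def filter_packets_during_jamming(timestamps, values, sources, jamming_moments, dos_source="DoS-Attacker"):
--     # Sort intervals by start once; prefix-max of ends turns "t inside some interval"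
--     # into one binary search per packet: O((n+m) log m) instead of O(n*m).
--     iv = sorted(jamming_moments, key=lambda p: p[0])
--     starts = [p[0] for p in iv]
--     maxend = []
--     m = None
--     for p in iv:
--         if m is None or p[1] > m:
--             m = p[1]
--         maxend.append(m)
--     ft = []
--     fv = []
--     for t, v, src in zip(timestamps, values, sources):
--         if src == dos_source:
--             i = _bisect_right(starts, t)
--             if i and maxend[i - 1] >= t:
--                 continue
--         ft.append(t)
--         fv.append(v)
--     return ft, fv
-- ===== Notes on version B (the rewrite author's own statement) =====
-- stated objective: faster
-- what changed: Replaces the per-packet linear scan of all jamming intervals with a one-time sort of intervals by start plus a prefix-max of interval ends, so each packet's jamming test is a single binary search (bisect_right) instead of an inner loop.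
import Mathlib
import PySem

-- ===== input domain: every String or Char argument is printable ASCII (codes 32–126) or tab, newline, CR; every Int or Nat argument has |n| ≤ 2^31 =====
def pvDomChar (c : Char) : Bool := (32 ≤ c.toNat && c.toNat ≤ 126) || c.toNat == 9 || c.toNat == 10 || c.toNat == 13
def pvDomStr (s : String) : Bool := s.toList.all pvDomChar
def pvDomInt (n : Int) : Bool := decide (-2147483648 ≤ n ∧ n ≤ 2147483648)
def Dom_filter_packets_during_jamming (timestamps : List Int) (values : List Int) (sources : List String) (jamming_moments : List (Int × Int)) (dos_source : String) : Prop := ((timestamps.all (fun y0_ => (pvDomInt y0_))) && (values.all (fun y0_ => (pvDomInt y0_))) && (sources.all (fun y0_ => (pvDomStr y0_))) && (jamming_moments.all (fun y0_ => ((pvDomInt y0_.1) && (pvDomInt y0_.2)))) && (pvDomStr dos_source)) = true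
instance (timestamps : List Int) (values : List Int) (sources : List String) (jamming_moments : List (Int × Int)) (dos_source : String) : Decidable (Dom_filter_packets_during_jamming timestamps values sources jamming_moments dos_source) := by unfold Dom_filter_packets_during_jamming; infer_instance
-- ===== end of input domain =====

-- B replaces A's per-packet linear scan of jamming intervals by a one-time sort by
-- interval start plus a prefix-max of ends, answering each packet's membership test
-- with one binary search (bisect_right); a timing run measures whether it is faster.


-- ===== PORT A =====
-- inner 'for interval in jamming_moments' loop with break
def pvInJamA (t : Int) : List (Int × Int) → Bool
  | [] => false
  | (s, e) :: rest => if s ≤ t ∧ t ≤ e then true else pvInJamA t rest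

def filter_packets_during_jamming (timestamps : List Int) (values : List Int) (sources : List String) (jamming_moments : List (Int × Int)) (dos_source : String) : List Int × List Int :=
  let acc := ((timestamps.zip values).zip sources).foldl (fun (acc : List Int × List Int) x =>
    let t := x.1.1
    let val := x.1.2
    let src := x.2
    let in_jamming := pvInJamA t jamming_moments
    if src = dos_source ∧ in_jamming = true then acc
    else (acc.1 ++ [t], acc.2 ++ [val])) ([], [])
  acc

-- ===== PORT B =====
-- the 'for p in iv' running-max loop building maxend (m starts as None)
def pvMaxendLoop (m : Option Int) : List (Int × Int) → List Int
  | [] => []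
  | p :: r =>
    let m' := match m with
      | none => p.2
      | some v => if p.2 > v then p.2 else v
    m' :: pvMaxendLoop (some m') r

def filter_packets_during_jamming_alt (timestamps : List Int) (values : List Int) (sources : List String) (jamming_moments : List (Int × Int)) (dos_source : String) : List Int × List Int :=
  let iv := PySem.List.sorted jamming_moments (fun p => p.1) false
  let starts := iv.map (fun p => p.1)
  let maxend := pvMaxendLoop none iv
  ((timestamps.zip values).zip sources).foldl (fun (acc : List Int × List Int) x =>
    let t := x.1.1
    if x.2 = dos_source then
      -- _bisect_right is the standard-library bisect_right algorithm: PySem.List.bisectRight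
      let i := PySem.List.bisectRight starts t
      if i ≠ 0 ∧ maxend.getD (i - 1) 0 ≥ t then acc
      else (acc.1 ++ [t], acc.2 ++ [x.1.2])
    else (acc.1 ++ [t], acc.2 ++ [x.1.2])) ([], [])

-- ===== PRECONDITION & SPEC =====
def Spec_filter_packets_during_jamming (timestamps : List Int) (values : List Int) (sources : List String) (jamming_moments : List (Int × Int)) (dos_source : String) (out : List Int × List Int) : Prop := out = filter_packets_during_jamming_alt timestamps values sources jamming_moments dos_source
instance (timestamps : List Int) (values : List Int) (sources : List String) (jamming_moments : List (Int × Int)) (dos_source : String) (out : List Int × List Int) : Decidable (Spec_filter_packets_during_jamming timestamps values sources jamming_moments dos_source out) := by unfold Spec_filter_packets_during_jamming; infer_instance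

-- ===== CLAIM (what is proved, stated in full; the proofs are below) =====
def Claim_equal_filter_packets_during_jamming : Prop := ∀ (timestamps : List Int) (values : List Int) (sources : List String) (jamming_moments : List (Int × Int)) (dos_source : String), Dom_filter_packets_during_jamming timestamps values sources jamming_moments dos_source → Spec_filter_packets_during_jamming timestamps values sources jamming_moments dos_source (filter_packets_during_jamming timestamps values sources jamming_moments dos_source)

-- ===== LEMMAS AND PROOFS =====

-- maxend[k] is an upper bound of the first k+1 interval ends
theorem pvMaxendLoop_init (P : List (Int × Int)) : ∀ (u : Int) (k : Nat), k < P.length →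
    u ≤ (pvMaxendLoop (some u) P).getD k 0 := by
  induction P with
  | nil => intro u k hk; simp at hk
  | cons p r ih =>
    intro u k hk
    cases k with
    | zero => simp [pvMaxendLoop]; split <;> omega
    | succ k' =>
      simp only [pvMaxendLoop, List.getD_cons_succ]
      have h1 : u ≤ (if p.2 > u then p.2 else u) := by split <;> omega
      exact le_trans h1 (ih _ k' (by simpa using hk))

theorem pvMaxendLoop_ub (P : List (Int × Int)) : ∀ (m : Option Int) (k : Nat), k < P.length →
    ∀ (j : Nat) (hj : j < P.length), j ≤ k → P[j].2 ≤ (pvMaxendLoop m P).getD k 0 := by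
  induction P with
  | nil => intro m k hk; simp at hk
  | cons p r ih =>
    intro m k hk j hj hjk
    cases k with
    | zero =>
      interval_cases j
      cases m with
      | none => simp [pvMaxendLoop]
      | some v => simp [pvMaxendLoop]; split <;> omega
    | succ k' =>
      cases j with
      | zero =>
        have h1 : p.2 ≤ (match m with | none => p.2 | some v => if p.2 > v then p.2 else v) := by
          cases m with
          | none => simp
          | some v => simp; split <;> omega
        simp only [pvMaxendLoop, List.getD_cons_succ]
        exact le_trans h1 (pvMaxendLoop_init r _ k' (by simpa using hk))
      | succ j' =>
        simp only [pvMaxendLoop, List.getD_cons_succ, List.getElem_cons_succ]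
        exact ih (some _) k' (by simpa using hk) j' (by simpa using hj) (by omega)

-- maxend[k] is attained among the first k+1 interval ends (or equals the carried m)
theorem pvMaxendLoop_att (P : List (Int × Int)) : ∀ (m : Option Int) (k : Nat), k < P.length →
    (∃ j, ∃ _ : j < P.length, j ≤ k ∧ P[j].2 = (pvMaxendLoop m P).getD k 0) ∨
      m = some ((pvMaxendLoop m P).getD k 0) := by
  induction P with
  | nil => intro m k hk; simp at hk
  | cons p r ih =>
    intro m k hk
    cases k with
    | zero =>
      cases m with
      | none => left; exact ⟨0, by simp, by omega, by simp [pvMaxendLoop]⟩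
      | some v =>
        by_cases h : p.2 > v
        · left; exact ⟨0, by simp, by omega, by simp [pvMaxendLoop, h]⟩
        · right; simp [pvMaxendLoop, h]
    | succ k' =>
      have hk' : k' < r.length := by simpa using hk
      rcases ih (some (match m with | none => p.2 | some v => if p.2 > v then p.2 else v)) k' hk' with ⟨j, hj, hjk, he⟩ | hm
      · left
        exact ⟨j + 1, by simpa using hj, by omega, by simpa [pvMaxendLoop] using he⟩
      · cases m with
        | none =>
          left
          refine ⟨0, by simp, by omega, ?_⟩
          simp only [pvMaxendLoop, List.getD_cons_succ, List.getElem_cons_zero]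
          exact Option.some.inj hm
        | some v =>
          by_cases h : p.2 > v
          · left
            refine ⟨0, by simp, by omega, ?_⟩
            simp only [pvMaxendLoop, List.getD_cons_succ, List.getElem_cons_zero]
            have := Option.some.inj hm
            simpa [h] using this
          · right
            simp only [pvMaxendLoop, List.getD_cons_succ]
            simp only [if_neg h] at hm ⊢
            exact hm

-- A's inner loop with break is List.any
theorem pvInJamA_eq_any (t : Int) (l : List (Int × Int)) :
    pvInJamA t l = l.any (fun p => decide (p.1 ≤ t) && decide (t ≤ p.2)) := by
  induction l with
  | nil => rfl
  | cons p r ih =>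
    obtain ⟨s, e⟩ := p
    by_cases h : s ≤ t ∧ t ≤ e
    · simp [pvInJamA, h]
    · simp [pvInJamA, h, ih]

-- the heart: B's prefix-max + binary-search membership test equals A's linear scan
theorem pvCheck_eq_inJam (jm : List (Int × Int)) (t : Int)
    (P : List (Int × Int)) (hP : P = PySem.List.sorted jm (fun p => p.1) false) :
    (PySem.List.bisectRight (P.map (fun p => p.1)) t ≠ 0 ∧
      (pvMaxendLoop none P).getD (PySem.List.bisectRight (P.map (fun p => p.1)) t - 1) 0 ≥ t)
      ↔ pvInJamA t jm = true := by
  have hpw : (P.map (fun p => p.1)).Pairwise (· ≤ ·) := by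
    rw [hP]; exact PySem.List.sorted_map_key_pairwise jm (fun p => p.1)
  obtain ⟨hle, hbefore, hafter⟩ := PySem.List.bisectRight_spec (P.map (fun p => p.1)) t hpw
  have hlen : (P.map (fun p => p.1)).length = P.length := by simp
  set i := PySem.List.bisectRight (P.map (fun p => p.1)) t with hi
  have hperm : P.Perm jm := by rw [hP]; exact PySem.List.sorted_perm jm (fun p => p.1) false
  rw [pvInJamA_eq_any, ← hperm.any_eq]
  constructor
  · rintro ⟨hi0, hge⟩
    have hi1 : i - 1 < P.length := by omega
    rcases pvMaxendLoop_att P none (i - 1) hi1 with ⟨j, hj, hjk, he⟩ | hm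
    · have hjlt : j < i := by omega
      have hstart : P[j].1 ≤ t := by
        have := hbefore j (by omega) hjlt
        simpa using this
      have hend : t ≤ P[j].2 := by rw [he]; exact hge
      exact List.any_eq_true.mpr ⟨P[j], List.getElem_mem hj, by simp [hstart, hend]⟩
    · exact absurd hm (by simp)
  · intro hany
    obtain ⟨p, hpmem, hcov⟩ := List.any_eq_true.mp hany
    obtain ⟨j, hj, rfl⟩ := List.mem_iff_getElem.mp hpmem
    simp only [Bool.and_eq_true, decide_eq_true_eq] at hcov
    have hji : j < i := by
      by_contra hc
      have := hafter j (by omega) (by omega)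
      simp at this
      omega
    have hi0 : i ≠ 0 := by omega
    have hub := pvMaxendLoop_ub P none (i - 1) (by omega) j hj (by omega)
    exact ⟨hi0, le_trans hcov.2 hub⟩

-- ===== VERDICT (by name: the statement is the Claim_ definition above) =====
theorem filter_packets_during_jamming_spec : Claim_equal_filter_packets_during_jamming := by
  intro ts vs ss jm ds _
  unfold Spec_filter_packets_during_jamming
  unfold filter_packets_during_jamming filter_packets_during_jamming_alt
  dsimp only
  congr 1
  funext acc x
  by_cases hs : x.2 = ds
  · by_cases hj : pvInJamA x.1.1 jm = true
    · rw [if_pos ⟨hs, hj⟩, if_pos hs,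
        if_pos ((pvCheck_eq_inJam jm x.1.1 _ rfl).mpr hj)]
    · rw [if_neg (by tauto), if_pos hs,
        if_neg (fun hc => hj ((pvCheck_eq_inJam jm x.1.1 _ rfl).mp hc))]
  · rw [if_neg (by tauto), if_neg hs]
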